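-- pv_equiv track=rewrite | github.com/doodung/Algorithm | 코딩테스트/카카오/2020 카카오 인턴십/보석쇼핑.py | solution
-- ===== SOURCE A (Python) =====
-- def solution(gems):
--     n = len(gems)
--     answer = [0, n - 1]
--     start, end = 0, 0
--     kind = len(set(gems))
--     dic = {gems[0]: 1}
--
--     while start < n and end < n:
--         if len(dic) < kind:
--             end += 1
--             if end == n:
--                 break
--             dic[gems[end]] = dic.get(gems[end], 0) + 1
--         else:
--             if (end - start + 1) < (answer[1] - answer[0] + 1):
--                 answer = [start, end]
--             if dic[gems[start]] == 1:
--                 del dic[gems[start]]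
--             else:
--                 dic[gems[start]] -= 1
--             start += 1
--
--     answer[0] += 1
--     answer[1] += 1
--     return answer
-- ===== SOURCE B (Python) =====
-- def solution(gems):
--     n = len(gems)
--     kind = len(set(gems))
--     best = [1, n]
--     last = {}
--     for end, g in enumerate(gems):
--         last[g] = end
--         if len(last) == kind:
--             start = min(last.values())
--             if end - start < best[1] - best[0]:
--                 best = [start + 1, end + 1]
--     return best
-- ===== Notes on version B (the rewrite author's own statement) =====
-- stated objective: alternative
-- what changed: A's shrinking two-pointer window with a count dict (add on the right, delete/decrement on the left, record while covered) is replaced by a last-occurrence index dict: for each end B stores last[g]=end and, once all kinds have been seen, the optimal window ending at end is [min(last.values())+1, end+1] directly - no start pointer, no counts, no deletions.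
import Mathlib
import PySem

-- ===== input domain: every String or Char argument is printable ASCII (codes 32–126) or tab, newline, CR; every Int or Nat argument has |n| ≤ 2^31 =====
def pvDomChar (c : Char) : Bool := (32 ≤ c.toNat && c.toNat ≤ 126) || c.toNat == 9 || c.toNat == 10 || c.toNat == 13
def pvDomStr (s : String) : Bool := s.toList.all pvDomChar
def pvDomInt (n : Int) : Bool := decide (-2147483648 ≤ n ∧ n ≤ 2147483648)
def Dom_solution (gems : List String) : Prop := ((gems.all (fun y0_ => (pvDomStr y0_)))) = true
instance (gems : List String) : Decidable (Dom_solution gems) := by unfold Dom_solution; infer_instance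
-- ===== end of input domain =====

-- B replaces A's shrinking count-dict two-pointer window by a last-occurrence dict: once all
-- kinds are seen, the best window ending at `end` is [min(last.values())+1, end+1] directly
-- (objective: alternative — no start pointer, no counts, no deletions).

-- ===== PORT A =====
-- A's while loop; one iteration either advances `end` (adding gems[end]) or advances `start`
-- (recording the window and removing gems[start]).  dict accesses dic[gems[start]] are ported
-- with getD (the key is always present when that branch runs, so getD is exact there).
def loopA (gems : List String) (n kind : Nat) (dic : PySem.Dict String Int)
    (answer : Int × Int) (start e : Nat) : Int × Int :=
  if h : start < n ∧ e < n then
    if dic.size < kind then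
      if e + 1 = n then answer
      else
        let g := gems.getD (e + 1) ""      -- gems[end] with 0 ≤ end < n: exact
        loopA gems n kind (dic.insert g (dic.getD g 0 + 1)) answer start (e + 1)
    else
      let answer' := if ((e : Int) - (start : Int) + 1) < (answer.2 - answer.1 + 1)
        then ((start : Int), (e : Int)) else answer
      let g := gems.getD start ""          -- gems[start] with 0 ≤ start < n: exact
      let dic' := if dic.getD g 0 = 1 then dic.erase g else dic.insert g (dic.getD g 0 - 1)
      loopA gems n kind dic' answer' (start + 1) e
  else answer
termination_by 2 * n - (start + e)
decreasing_by all_goals omega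

def solution (gems : List String) : List Int :=
  match gems with
  | [] => []   -- Python raises IndexError here (dic = {gems[0]: 1}); excluded by Pre_solution
  | g0 :: rest =>
    let n := (g0 :: rest).length
    let kind := (PySem.Set.ofList (g0 :: rest)).length
    let dic := (PySem.Dict.empty : PySem.Dict String Int).insert g0 1
    let r := loopA (g0 :: rest) n kind dic (0, (n : Int) - 1) 0 0
    [r.1 + 1, r.2 + 1]

-- ===== PORT B =====
-- Source B's `if len(last) == kind:` block: record [min(last.values())+1, end+1] if strictly smaller
def updB (kind : Nat) (last : PySem.Dict String Int) (i : Int) (best : Int × Int) : Int × Int :=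
  if last.size = kind then
    let start := (PySem.List.min? last.values (fun v => v)).getD 0
      -- min(last.values()): the list is nonempty when size = kind here (kind ≥ 1 inside the loop), so getD is exact
    if i - start < best.2 - best.1 then (start + 1, i + 1) else best
  else best

-- one iteration of Source B's `for end, g in enumerate(gems):` body
def stepB (kind : Nat) (s : PySem.Dict String Int × (Int × Int)) (q : Int × String) :
    PySem.Dict String Int × (Int × Int) :=
  let last := s.1.insert q.2 q.1
  (last, updB kind last q.1 s.2)

def solution_alt (gems : List String) : List Int :=
  let n := gems.length
  let kind := (PySem.Set.ofList gems).length
  let st := (PySem.List.enumerate gems).foldl (stepB kind) (PySem.Dict.empty, (1, (n : Int)))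
  [st.2.1, st.2.2]

-- ===== PRECONDITION & SPEC =====
-- Pre_ excludes only the empty list, on which A raises IndexError at `dic = {gems[0]: 1}`.
def Pre_solution (gems : List String) : Prop := gems ≠ []
instance (gems : List String) : Decidable (Pre_solution gems) := by unfold Pre_solution; infer_instance
def pvWitness_solution : List String := (["a", "b", "a"])

def Spec_solution (gems : List String) (out : List Int) : Prop := out = solution_alt gems
instance (gems : List String) (out : List Int) : Decidable (Spec_solution gems out) := by unfold Spec_solution; infer_instance

-- ===== CLAIM (what is proved, stated in full; the proofs are below) =====
def Claim_equal_solution : Prop := ∀ (gems : List String), Dom_solution gems → Pre_solution gems → Spec_solution gems (solution gems)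

-- ===== LEMMAS AND PROOFS =====

-- gems[start..e] (inclusive), the current window of A
def pvWindow (gems : List String) (s e : Nat) : List String := (gems.drop s).take (e + 1 - s)

-- A's dict holds exactly the positive multiplicities of the window, with no duplicate keys
def CntInv (w : List String) (d : PySem.Dict String Int) : Prop :=
  d.keys.Nodup ∧ ∀ k, d.get? k = if w.count k = 0 then none else some ((w.count k : Int))

-- B's dict after the prefix p: each key mapped to its LAST index in p
def lastD (p : List String) : PySem.Dict String Int :=
  (PySem.List.enumerate p).foldl (fun d q => d.insert q.2 q.1) PySem.Dict.empty

theorem window_snoc (gems : List String) (s e : Nat) (hs : s ≤ e + 1) (he : e + 1 < gems.length) :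
    pvWindow gems s (e + 1) = pvWindow gems s e ++ [gems.getD (e + 1) ""] := by
  unfold pvWindow
  have h2 : e + 1 + 1 - s = (e + 1 - s) + 1 := by omega
  rw [h2, List.take_add_one, List.getElem?_drop]
  have h3 : s + (e + 1 - s) = e + 1 := by omega
  rw [h3, List.getElem?_eq_getElem he]
  simp [List.getD_eq_getElem?_getD, List.getElem?_eq_getElem he]

theorem window_cons (gems : List String) (s e : Nat) (hs : s ≤ e) (he : e < gems.length) :
    pvWindow gems s e = gems.getD s "" :: pvWindow gems (s + 1) e := by
  have hs' : s < gems.length := lt_of_le_of_lt hs he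
  unfold pvWindow
  rw [← List.getElem_cons_drop hs']
  have h2 : e + 1 - s = (e - s) + 1 := by omega
  rw [h2, List.take_succ_cons]
  have h3 : e - s = e + 1 - (s + 1) := by omega
  rw [h3]
  congr 1
  rw [List.getD_eq_getElem?_getD, List.getElem?_eq_getElem hs']
  rfl

theorem window_empty (gems : List String) (e : Nat) : pvWindow gems (e + 1) e = [] := by
  simp [pvWindow]

theorem window_eq_drop_take (gems : List String) (s e : Nat) :
    pvWindow gems s e = (gems.take (e + 1)).drop s := by
  rw [pvWindow, List.drop_take]

-- keys of a CntInv dict are exactly the window's elements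
theorem cntinv_mem_keys {w : List String} {d : PySem.Dict String Int} (h : CntInv w d) (k : String) :
    k ∈ d.keys ↔ k ∈ w := by
  constructor
  · intro hk
    by_contra hw
    have h0 : w.count k = 0 := List.count_eq_zero.mpr hw
    exact (PySem.Dict.get?_eq_none_iff_not_mem_keys d k).mp (by rw [h.2 k, h0]; simp) hk
  · intro hw
    by_contra hk
    have hnone := (PySem.Dict.get?_eq_none_iff_not_mem_keys d k).mpr hk
    rw [h.2 k] at hnone
    have h0 : w.count k ≠ 0 := by simpa [List.count_eq_zero] using hw
    simp [h0] at hnone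

theorem cntinv_size {w : List String} {d : PySem.Dict String Int} (h : CntInv w d) :
    d.size = (PySem.Set.ofList w).length := by
  have hkeys : d.size = d.keys.length := by simp [PySem.Dict.size, PySem.Dict.keys]
  have h1 : d.keys.toFinset = (PySem.Set.ofList w).toFinset := by
    ext x
    simp [List.mem_toFinset, PySem.Set.mem_ofList, cntinv_mem_keys h]
  rw [hkeys, ← List.toFinset_card_of_nodup h.1, h1,
    List.toFinset_card_of_nodup (PySem.Set.nodup_ofList w)]

theorem distinct_le {w gems : List String} (hsub : ∀ x ∈ w, x ∈ gems) :
    (PySem.Set.ofList w).length ≤ (PySem.Set.ofList gems).length := by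
  rw [← List.toFinset_card_of_nodup (PySem.Set.nodup_ofList w),
    ← List.toFinset_card_of_nodup (PySem.Set.nodup_ofList gems)]
  apply Finset.card_le_card
  intro x hx
  simp only [List.mem_toFinset, PySem.Set.mem_ofList] at *
  exact hsub x hx

theorem distinct_eq_iff {w gems : List String} (hsub : ∀ x ∈ w, x ∈ gems) :
    (PySem.Set.ofList w).length = (PySem.Set.ofList gems).length ↔ ∀ g ∈ gems, g ∈ w := by
  rw [← List.toFinset_card_of_nodup (PySem.Set.nodup_ofList w),
    ← List.toFinset_card_of_nodup (PySem.Set.nodup_ofList gems)]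
  have hs : (PySem.Set.ofList w).toFinset ⊆ (PySem.Set.ofList gems).toFinset := by
    intro x hx
    simp only [List.mem_toFinset, PySem.Set.mem_ofList] at *
    exact hsub x hx
  constructor
  · intro hcard g hg
    have heq : (PySem.Set.ofList w).toFinset = (PySem.Set.ofList gems).toFinset :=
      Finset.eq_of_subset_of_card_le hs (le_of_eq hcard.symm)
    have : g ∈ (PySem.Set.ofList w).toFinset := by
      rw [heq]; simp only [List.mem_toFinset, PySem.Set.mem_ofList]; exact hg
    simpa [List.mem_toFinset, PySem.Set.mem_ofList] using this
  · intro hall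
    have hs2 : (PySem.Set.ofList gems).toFinset ⊆ (PySem.Set.ofList w).toFinset := by
      intro x hx
      simp only [List.mem_toFinset, PySem.Set.mem_ofList] at *
      exact hall x hx
    exact le_antisymm (Finset.card_le_card hs) (Finset.card_le_card hs2)

-- find? over the items filtered by `erase`
theorem find?_filter_ne (k g : String) (l : List (String × Int)) :
    List.find? (fun p => p.1 == k) (l.filter (fun p => !(p.1 == g))) =
      if k = g then none else List.find? (fun p => p.1 == k) l := by
  induction l with
  | nil => simp
  | cons p t ih =>
    by_cases hpg : p.1 = g
    · rw [List.filter_cons_of_neg (by simp [hpg]), ih]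
      by_cases hkg : k = g
      · simp [hkg]
      · rw [if_neg hkg, if_neg hkg, List.find?_cons_of_neg (by simp [hpg]; exact fun h => hkg h.symm)]
    · rw [List.filter_cons_of_pos (by simp [hpg])]
      by_cases hpk : p.1 = k
      · have hkg : ¬ k = g := fun h => hpg (by rw [hpk, h])
        rw [List.find?_cons_of_pos (by simp [hpk]), List.find?_cons_of_pos (by simp [hpk]), if_neg hkg]
      · rw [List.find?_cons_of_neg (by simp [hpk]), List.find?_cons_of_neg (by simp [hpk]), ih]

theorem get?_erase (d : PySem.Dict String Int) (g k : String) :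
    (d.erase g).get? k = if k = g then none else d.get? k := by
  have h1 : (d.erase g).get? k
      = ((d.items.filter (fun p => !(p.1 == g))).find? (fun p => p.1 == k)).map (·.2) := rfl
  rw [h1, find?_filter_ne]
  split
  · rfl
  · rfl

theorem nodup_keys_erase (d : PySem.Dict String Int) (g : String) (h : d.keys.Nodup) :
    (d.erase g).keys.Nodup := by
  have hsub : (List.map (fun (x : String × Int) => x.1)
        (d.items.filter (fun p => !(p.1 == g)))).Sublist
      (List.map (fun (x : String × Int) => x.1) d.items) :=
    List.Sublist.map _ List.filter_sublist
  exact List.Nodup.sublist hsub h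

-- invariant maintenance: adding one element at the right end
theorem cntinv_add {w : List String} {d : PySem.Dict String Int} (h : CntInv w d) (g : String) :
    CntInv (w ++ [g]) (d.insert g (d.getD g 0 + 1)) := by
  refine ⟨PySem.Dict.nodup_keys_insert d g _ h.1, fun k => ?_⟩
  rw [PySem.Dict.get?_insert]
  by_cases hk : k = g
  · subst hk
    have hcnt : (w ++ [k]).count k = w.count k + 1 := by
      simp [List.count_append]
    rw [if_pos rfl, hcnt, PySem.Dict.getD_eq_get?_getD, h.2 k]
    by_cases h0 : w.count k = 0
    · simp [h0]
    · rw [if_neg h0, if_neg (by omega)]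
      simp only [Option.getD_some]
      exact congrArg some (by push_cast; ring)
  · have hcnt : (w ++ [g]).count k = w.count k := by
      simp [List.count_append, Ne.symm hk]
    rw [if_neg hk, hcnt, h.2 k]

-- invariant maintenance: removing the leftmost element
theorem cntinv_shrink {w : List String} {d : PySem.Dict String Int} {g : String}
    (h : CntInv (g :: w) d) :
    CntInv w (if d.getD g 0 = 1 then d.erase g else d.insert g (d.getD g 0 - 1)) := by
  have hcg : (g :: w).count g = w.count g + 1 := by simp
  have hne0 : (g :: w).count g ≠ 0 := by omega
  have hget : d.get? g = some (((g :: w).count g : Int)) := by rw [h.2 g, if_neg hne0]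
  have hgetD : d.getD g 0 = (((g :: w).count g : Int)) := by
    rw [PySem.Dict.getD_eq_get?_getD, hget]; rfl
  by_cases h1 : d.getD g 0 = 1
  · have hw0 : w.count g = 0 := by
      rw [hgetD] at h1
      omega
    rw [if_pos h1]
    refine ⟨nodup_keys_erase d g h.1, fun k => ?_⟩
    rw [get?_erase]
    by_cases hk : k = g
    · subst hk
      simp [hw0]
    · rw [if_neg hk, h.2 k]
      have : (g :: w).count k = w.count k := by simp [Ne.symm hk]
      rw [this]
  · rw [if_neg h1]
    have hw1 : w.count g ≠ 0 := by
      intro h0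
      apply h1
      rw [hgetD, hcg, h0]
      simp
    refine ⟨PySem.Dict.nodup_keys_insert d g _ h.1, fun k => ?_⟩
    rw [PySem.Dict.get?_insert]
    by_cases hk : k = g
    · subst hk
      rw [if_pos rfl, if_neg hw1, hgetD, hcg]
      congr 1
      push_cast
      ring
    · rw [if_neg hk, h.2 k]
      have : (g :: w).count k = w.count k := by simp [Ne.symm hk]
      rw [this]

theorem cntinv_init (g0 : String) :
    CntInv [g0] ((PySem.Dict.empty : PySem.Dict String Int).insert g0 1) := by
  refine ⟨PySem.Dict.nodup_keys_insert _ _ _ PySem.Dict.nodup_keys_empty, fun k => ?_⟩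
  rw [PySem.Dict.get?_insert, PySem.Dict.get?_empty]
  by_cases hk : k = g0
  · subst hk
    simp
  · simp [hk, Ne.symm hk]

theorem kind_pos (gems : List String) (hne : gems ≠ []) :
    1 ≤ (PySem.Set.ofList gems).length := by
  obtain ⟨x, hx⟩ := List.exists_mem_of_ne_nil gems hne
  exact List.length_pos_of_mem ((PySem.Set.mem_ofList gems x).mpr hx)

-- ---- lastD facts ----

theorem enumerate_append_singleton {α : Type} (xs : List α) (x : α) (s : Int) :
    PySem.List.enumerate (xs ++ [x]) s = PySem.List.enumerate xs s ++ [(s + xs.length, x)] := by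
  induction xs generalizing s with
  | nil => simp [PySem.List.enumerate_cons, PySem.List.enumerate]
  | cons y t ih =>
    rw [List.cons_append, PySem.List.enumerate_cons, PySem.List.enumerate_cons, ih]
    simp
    ring_nf

theorem enumerate_drop {α : Type} (xs : List α) :
    ∀ (j : Nat) (s : Int), (PySem.List.enumerate xs s).drop j = PySem.List.enumerate (xs.drop j) (s + j) := by
  induction xs with
  | nil => intro j s; simp [PySem.List.enumerate]
  | cons y t ih =>
    intro j s
    cases j with
    | zero => simp
    | succ j' =>
      rw [PySem.List.enumerate_cons, List.drop_succ_cons, List.drop_succ_cons, ih j' (s + 1)]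
      congr 1
      push_cast
      ring

theorem lastD_snoc (p : List String) (x : String) :
    lastD (p ++ [x]) = (lastD p).insert x (p.length : Int) := by
  unfold lastD
  rw [enumerate_append_singleton, List.foldl_append]
  simp

theorem keys_lastD (p : List String) : (lastD p).keys = PySem.Set.ofList p := by
  unfold lastD
  have h := PySem.Dict.keys_foldl_insert_key (ν := Int) (PySem.List.enumerate p)
    (fun q => q.2) (fun _ q => q.1) (PySem.Dict.empty)
  simp only [PySem.List.map_snd_enumerate] at h
  rw [show (fun (d : PySem.Dict String Int) (q : Int × String) => d.insert q.2 q.1)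
      = (fun (d : PySem.Dict String Int) (x : Int × String) =>
          d.insert x.2 ((fun (_ : PySem.Dict String Int) (q : Int × String) => q.1) d x)) from rfl]
  rw [h, PySem.Set.ofList_eq_foldl]
  rfl

theorem nodup_keys_lastD (p : List String) : (lastD p).keys.Nodup := by
  rw [keys_lastD]; exact PySem.Set.nodup_ofList p

theorem size_lastD (p : List String) : (lastD p).size = (PySem.Set.ofList p).length := by
  have h : (lastD p).size = (lastD p).keys.length := by simp [PySem.Dict.size, PySem.Dict.keys]
  rw [h, keys_lastD]

theorem mem_iff_lastD_isSome (p : List String) (g : String) :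
    g ∈ p ↔ ((lastD p).get? g).isSome := by
  rw [← PySem.Set.mem_ofList p g, ← keys_lastD]
  constructor
  · intro hk
    cases hh : (lastD p).get? g with
    | none => exact absurd hk ((PySem.Dict.get?_eq_none_iff_not_mem_keys _ g).mp hh)
    | some v => rfl
  · intro hs
    by_contra hk
    rw [(PySem.Dict.get?_eq_none_iff_not_mem_keys _ g).mpr hk] at hs
    simp at hs

-- the value stored in lastD is the LAST index of its key
theorem lastD_isLast (p : List String) (g : String) (j : Int) (h : (lastD p).get? g = some j) :
    0 ≤ j ∧ j.toNat < p.length ∧ p.getD j.toNat "" = g ∧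
      ∀ i, j.toNat < i → i < p.length → p.getD i "" ≠ g := by
  induction p using List.reverseRecOn generalizing j with
  | nil => simp [lastD, PySem.List.enumerate, PySem.Dict.get?_empty] at h
  | append_singleton p x ih =>
    rw [lastD_snoc, PySem.Dict.get?_insert] at h
    by_cases hg : g = x
    · rw [if_pos hg] at h
      have hj : j = (p.length : Int) := by exact (Option.some_injective _ h).symm
      subst hj
      refine ⟨by positivity, by simp, ?_, ?_⟩
      · rw [Int.toNat_natCast, List.getD_append_right p [x] "" p.length le_rfl]
        simp [hg]
      · intro i h1 h2
        rw [Int.toNat_natCast] at h1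
        simp at h2
        omega
    · rw [if_neg hg] at h
      obtain ⟨h0, h1, h2, h3⟩ := ih j h
      refine ⟨h0, by simp; omega, by rw [List.getD_append p [x] "" _ h1]; exact h2, ?_⟩
      intro i hi1 hi2
      simp at hi2
      rcases Nat.lt_or_ge i p.length with hlt | hge
      · rw [List.getD_append p [x] "" _ hlt]
        exact h3 i hi1 hlt
      · have hip : i = p.length := by omega
        rw [hip, List.getD_append_right p [x] "" p.length le_rfl]
        simpa using fun hh => hg hh.symm

-- membership in the dropped prefix ↔ last index at least s
theorem mem_drop_iff_lastD (p : List String) (g : String) (s : Nat) (hg : g ∈ p) :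
    g ∈ p.drop s ↔ ∃ j, (lastD p).get? g = some j ∧ (s : Int) ≤ j := by
  obtain ⟨j, hj⟩ := Option.isSome_iff_exists.mp ((mem_iff_lastD_isSome p g).mp hg)
  obtain ⟨h0, h1, h2, h3⟩ := lastD_isLast p g j hj
  constructor
  · intro hmem
    obtain ⟨i, hi, hgi⟩ := List.getElem_of_mem hmem
    rw [List.getElem_drop] at hgi
    have hilen : s + i < p.length := by
      have h5 := hi
      rw [List.length_drop] at h5
      omega
    have hsi : s + i ≤ j.toNat := by
      by_contra hc
      exact h3 (s + i) (by omega) hilen (by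
        rw [List.getD_eq_getElem?_getD, List.getElem?_eq_getElem hilen]; simpa using hgi)
    exact ⟨j, hj, by omega⟩
  · rintro ⟨j', hj', hsj⟩
    have hjj : j' = j := by rw [hj] at hj'; exact (Option.some_injective _ hj').symm
    rw [hjj] at hsj
    have hsle : s ≤ j.toNat := by omega
    have hidx : j.toNat - s < (p.drop s).length := by
      rw [List.length_drop]; omega
    have : (p.drop s)[j.toNat - s] = g := by
      rw [List.getElem_drop]
      have hx : s + (j.toNat - s) = j.toNat := by omega
      rw [List.getD_eq_getElem?_getD, List.getElem?_eq_getElem h1] at h2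
      simp only [Option.getD_some] at h2
      simpa [hx] using h2
    exact this ▸ List.getElem_mem hidx

-- min(last.values()) bounds every last index
theorem values_ne_nil (p : List String) (hne : p ≠ []) : (lastD p).values ≠ [] := by
  have hkne : (lastD p).keys ≠ [] := by
    rw [keys_lastD]
    obtain ⟨x, hx⟩ := List.exists_mem_of_ne_nil p hne
    exact List.ne_nil_of_mem ((PySem.Set.mem_ofList p x).mpr hx)
  rw [PySem.Dict.values_eq_map_keys _ (nodup_keys_lastD p) 0]
  simpa using hkne

theorem min_some (p : List String) (hne : p ≠ []) :
    ∃ m, PySem.List.min? (lastD p).values (fun v => v) = some m := by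
  cases hmm : PySem.List.min? (lastD p).values (fun v => v) with
  | none => exact absurd ((PySem.List.min?_eq_none_iff _ _).mp hmm) (values_ne_nil p hne)
  | some m => exact ⟨m, rfl⟩

-- the minimum of the last-occurrence values is itself a valid index
theorem min_bounds (p : List String) (hne : p ≠ []) :
    0 ≤ (PySem.List.min? (lastD p).values (fun v => v)).getD 0 ∧
      (PySem.List.min? (lastD p).values (fun v => v)).getD 0 < (p.length : Int) := by
  obtain ⟨m, hm⟩ := min_some p hne
  rw [hm]
  simp only [Option.getD_some]
  have hmmem := PySem.List.min?_mem hm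
  obtain ⟨⟨k, v⟩, hitem, hv⟩ := List.mem_map.mp hmmem
  have hget : (lastD p).get? k = some v := PySem.Dict.get?_of_mem_items _ hitem (nodup_keys_lastD p)
  obtain ⟨h0, h1, _, _⟩ := lastD_isLast p k v hget
  simp only at hv
  subst hv
  omega

theorem min_char (p : List String) (hne : p ≠ []) (s : Nat) :
    (∀ g ∈ p, ∃ j, (lastD p).get? g = some j ∧ (s : Int) ≤ j) ↔
      (s : Int) ≤ (PySem.List.min? (lastD p).values (fun v => v)).getD 0 := by
  have hnd := nodup_keys_lastD p
  obtain ⟨m, hm⟩ := min_some p hne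
  rw [hm]
  simp only [Option.getD_some]
  constructor
  · intro hall
    have hmmem := PySem.List.min?_mem hm
    rw [PySem.Dict.values_eq_map_keys _ hnd 0] at hmmem
    obtain ⟨k, hk, hkm⟩ := List.mem_map.mp hmmem
    have hkp : k ∈ p := by rw [keys_lastD] at hk; exact (PySem.Set.mem_ofList p k).mp hk
    obtain ⟨j, hj, hsj⟩ := hall k hkp
    have : (lastD p).getD k 0 = j := by rw [PySem.Dict.getD_eq_get?_getD, hj]; rfl
    rw [← hkm, this]
    exact hsj
  · intro hsm g hgp
    obtain ⟨j, hj⟩ := Option.isSome_iff_exists.mp ((mem_iff_lastD_isSome p g).mp hgp)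
    have hjv : j ∈ (lastD p).values := by
      have := PySem.Dict.mem_items_of_get?_eq_some _ hj
      exact List.mem_map.mpr ⟨(g, j), this, rfl⟩
    exact ⟨j, hj, le_trans hsm (PySem.List.min?_isMin hm j hjv)⟩

-- the coverage characterisation: window [s..] of p covers all kinds of gems iff
-- all kinds occur in p and s ≤ min of the last-occurrence indices
theorem covered_iff (gems p : List String) (hne : p ≠ []) (hsub : ∀ x ∈ p, x ∈ gems) (s : Nat) :
    (PySem.Set.ofList (p.drop s)).length = (PySem.Set.ofList gems).length ↔
      ((PySem.Set.ofList p).length = (PySem.Set.ofList gems).length ∧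
        (s : Int) ≤ (PySem.List.min? (lastD p).values (fun v => v)).getD 0) := by
  have hsub2 : ∀ x ∈ p.drop s, x ∈ gems := fun x hx => hsub x (List.mem_of_mem_drop hx)
  rw [distinct_eq_iff hsub2, distinct_eq_iff hsub]
  constructor
  · intro h
    have hall : ∀ g ∈ gems, g ∈ p := fun g hg => List.mem_of_mem_drop (h g hg)
    refine ⟨hall, (min_char p hne s).mp ?_⟩
    intro g hgp
    exact (mem_drop_iff_lastD p g s hgp).mp (h g (hsub g hgp))
  · rintro ⟨hall, hmin⟩ g hg
    have hgp : g ∈ p := hall g hg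
    exact (mem_drop_iff_lastD p g s hgp).mpr ((min_char p hne s).mpr hmin g hgp)

-- recording A's candidate (s, e) then B's pending update equals B's pending update alone:
-- the optimal candidate (min+1, e+1) absorbs the longer window A records first
theorem updB_absorb (K : Nat) (d : PySem.Dict String Int) (e s : Int) (ans : Int × Int)
    (hsz : d.size = K)
    (hstm : s ≤ (PySem.List.min? d.values (fun v => v)).getD 0) :
    updB K d e
      ((if e - s + 1 < ans.2 - ans.1 + 1 then ((s, e) : Int × Int) else ans).1 + 1,
       (if e - s + 1 < ans.2 - ans.1 + 1 then ((s, e) : Int × Int) else ans).2 + 1)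
      = updB K d e (ans.1 + 1, ans.2 + 1) := by
  unfold updB
  rw [if_pos hsz, if_pos hsz]
  by_cases hrec : e - s + 1 < ans.2 - ans.1 + 1
  · rw [if_pos hrec]
    have hb1 : ((((s, e) : Int × Int).1 + 1, ((s, e) : Int × Int).2 + 1) : Int × Int).2
        - (((s, e) : Int × Int).1 + 1, ((s, e) : Int × Int).2 + 1).1 = e - s := by
      show e + 1 - (s + 1) = e - s
      ring
    have hb2 : (((ans.1 + 1, ans.2 + 1)) : Int × Int).2 - ((ans.1 + 1, ans.2 + 1) : Int × Int).1
        = ans.2 - ans.1 := by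
      show ans.2 + 1 - (ans.1 + 1) = ans.2 - ans.1
      ring
    rw [hb1, hb2]
    rcases lt_or_eq_of_le hstm with hsm | hsm
    · rw [if_pos (by omega), if_pos (by omega)]
    · rw [if_neg (by omega), if_pos (by omega), ← hsm]
  · rw [if_neg hrec]

-- the bisimulation: A's loop from a post-add state at end = e equals B's fold over the
-- remaining enumerated elements, starting from the last-occurrence dict of the prefix and
-- the best value already updated for e; B's best carries the +1 offset throughout
theorem bisim (gems : List String) (hne : gems ≠ []) :
    ∀ (μ start e : Nat) (dic : PySem.Dict String Int) (ans : Int × Int),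
      2 * gems.length - (start + e) ≤ μ →
      start ≤ e + 1 → e < gems.length →
      CntInv (pvWindow gems start e) dic →
      (start = 0 ∨ ans.2 - ans.1 + 1 ≤ (e : Int) - (start : Int) + 2) →
      (((loopA gems gems.length (PySem.Set.ofList gems).length dic ans start e).1 + 1,
        (loopA gems gems.length (PySem.Set.ofList gems).length dic ans start e).2 + 1) : Int × Int)
        = (((PySem.List.enumerate gems).drop (e + 1)).foldl
            (stepB (PySem.Set.ofList gems).length)
            (lastD (gems.take (e + 1)),
             updB (PySem.Set.ofList gems).length (lastD (gems.take (e + 1))) (e : Int)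
               (ans.1 + 1, ans.2 + 1))).2 := by
  intro μ
  induction μ with
  | zero =>
    intro start e dic ans hμ hse he hinv hInv
    omega
  | succ μ ih =>
    intro start e dic ans hμ hse he hinv hInv
    have hkind := kind_pos gems hne
    set K := (PySem.Set.ofList gems).length with hK
    set p := gems.take (e + 1) with hp
    have hplen : p.length = e + 1 := by
      rw [hp, List.length_take]; omega
    have hpne : p ≠ [] := by
      intro hc; rw [hc] at hplen; simp at hplen
    have hpsub : ∀ x ∈ p, x ∈ gems := fun x hx => List.mem_of_mem_take hx
    have hwin : pvWindow gems start e = p.drop start := window_eq_drop_take gems start e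
    have hsize : dic.size = (PySem.Set.ofList (p.drop start)).length := by
      rw [← hwin]; exact cntinv_size hinv
    have hle : dic.size ≤ K := by
      rw [hsize, hK]
      exact distinct_le (fun x hx => hpsub x (List.mem_of_mem_drop hx))
    set m0 := (PySem.List.min? (lastD p).values (fun v => v)).getD 0 with hm0
    obtain ⟨hm0nn, hm0lt⟩ := min_bounds p hpne
    have hcov := covered_iff gems p hpne hpsub start
    rw [← hsize, ← hK, ← size_lastD, ← hm0] at hcov
    by_cases hstart : start < gems.length
    · by_cases hlt : dic.size < K
      · -- A advances `end`; B's pending update is a no-op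
        have hA0 : loopA gems gems.length K dic ans start e
            = if dic.size < K then
                (if e + 1 = gems.length then ans
                 else loopA gems gems.length K
                   (dic.insert (gems.getD (e + 1) "")
                     (dic.getD (gems.getD (e + 1) "") 0 + 1)) ans start (e + 1))
              else loopA gems gems.length K
                (if dic.getD (gems.getD start "") 0 = 1 then dic.erase (gems.getD start "")
                 else dic.insert (gems.getD start "") (dic.getD (gems.getD start "") 0 - 1))
                (if ((e : Int) - (start : Int) + 1) < (ans.2 - ans.1 + 1)
                 then ((start : Int), (e : Int)) else ans)
                (start + 1) e := by
          conv_lhs => rw [loopA]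
          rw [dif_pos ⟨hstart, he⟩]
        have hnocov : ¬ ((lastD p).size = K ∧ (start : Int) ≤ m0) := by
          intro hc
          have := hcov.mpr hc
          omega
        have hupd : updB K (lastD p) (e : Int) (ans.1 + 1, ans.2 + 1) = (ans.1 + 1, ans.2 + 1) := by
          unfold updB
          by_cases hsz : (lastD p).size = K
          · rw [if_pos hsz]
            have hm0s : m0 < (start : Int) := by
              by_contra hc
              exact hnocov ⟨hsz, by omega⟩
            have hs1 : 1 ≤ start := by
              by_contra hc
              have : start = 0 := by omega
              omega
            have hInv2 : ans.2 - ans.1 + 1 ≤ (e : Int) - (start : Int) + 2 := by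
              rcases hInv with h | h
              · omega
              · exact h
            rw [if_neg (by simp only; omega)]
          · rw [if_neg hsz]
        rw [hA0, if_pos hlt, hupd]
        by_cases hend : e + 1 = gems.length
        · rw [if_pos hend]
          have hdrop : (PySem.List.enumerate gems).drop (e + 1) = [] := by
            apply List.drop_eq_nil_of_le
            rw [PySem.List.length_enumerate]
            omega
          rw [hdrop]
          rfl
        · rw [if_neg hend]
          have he1 : e + 1 < gems.length := by omega
          -- peel off element e+1 from the enumeration
          have hdrop1 : (PySem.List.enumerate gems).drop (e + 1)
              = (((e : Int) + 1), gems[e + 1]'he1) :: (PySem.List.enumerate gems).drop (e + 2) := by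
            rw [enumerate_drop gems (e + 1) 0, enumerate_drop gems (e + 2) 0,
              List.drop_eq_getElem_cons he1, PySem.List.enumerate_cons]
            have h1 : (0 : Int) + ((e + 1 : Nat) : Int) = (e : Int) + 1 := by push_cast; ring
            have h2 : (e : Int) + 1 + 1 = 0 + ((e + 2 : Nat) : Int) := by
              push_cast; ring
            rw [h1, h2]
          have hgetD : gems.getD (e + 1) "" = gems[e + 1]'he1 := by
            rw [List.getD_eq_getElem?_getD, List.getElem?_eq_getElem he1]
            rfl
          have hpsnoc : gems.take (e + 2) = p ++ [gems[e + 1]'he1] := by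
            rw [hp, List.take_add_one, List.getElem?_eq_getElem he1]
            rfl
          have hlastD : lastD (gems.take (e + 2))
              = (lastD p).insert (gems[e + 1]'he1) ((e : Int) + 1) := by
            rw [hpsnoc, lastD_snoc, hplen]
            push_cast
            ring_nf
          have hinv' : CntInv (pvWindow gems start (e + 1))
              (dic.insert (gems.getD (e + 1) "") (dic.getD (gems.getD (e + 1) "") 0 + 1)) := by
            rw [window_snoc gems start e hse he1]
            exact cntinv_add hinv _
          have hstep := ih start (e + 1) _ ans (by omega) (by omega) he1 hinv'
            (by rcases hInv with h | h
                · exact Or.inl h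
                · right; push_cast; omega)
          rw [hdrop1, List.foldl_cons, hstep, hlastD]
          have hcast : ((e : Int) + 1) = ((e + 1 : Nat) : Int) := by push_cast; ring
          rw [hcast]
          rfl
      · -- all kinds covered: one shrink step of A; B's pending update absorbs it
        have hdsz : dic.size = K := le_antisymm hle (not_lt.mp hlt)
        obtain ⟨hszK, hstm⟩ := hcov.mp (by rw [← hdsz, hsize])
        have hse2 : start ≤ e := by
          by_contra hc
          have hs1 : start = e + 1 := by omega
          have h0 : dic.size = 0 := by
            rw [← hwin] at hsize
            rw [hsize, hs1, window_empty]
            rfl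
          omega
        have hA0 : loopA gems gems.length K dic ans start e
            = loopA gems gems.length K
                (if dic.getD (gems.getD start "") 0 = 1 then dic.erase (gems.getD start "")
                 else dic.insert (gems.getD start "") (dic.getD (gems.getD start "") 0 - 1))
                (if ((e : Int) - (start : Int) + 1) < (ans.2 - ans.1 + 1)
                 then ((start : Int), (e : Int)) else ans)
                (start + 1) e := by
          conv_lhs => rw [loopA]
          rw [dif_pos ⟨hstart, he⟩, if_neg hlt]
        set ans' := (if ((e : Int) - (start : Int) + 1) < (ans.2 - ans.1 + 1)
          then (((start : Int), (e : Int)) : Int × Int) else ans) with hans'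
        have hinv' : CntInv (pvWindow gems (start + 1) e)
            (if dic.getD (gems.getD start "") 0 = 1 then dic.erase (gems.getD start "")
             else dic.insert (gems.getD start "") (dic.getD (gems.getD start "") 0 - 1)) := by
          apply cntinv_shrink
          rw [← window_cons gems start e hse2 he]
          exact hinv
        have hInv' : start + 1 = 0 ∨ ans'.2 - ans'.1 + 1 ≤ (e : Int) - ((start : Nat) + 1 : Nat) + 2 := by
          right
          rw [hans']
          split_ifs with hrec
          · simp only
            push_cast
            omega
          · push_cast
            push_cast at hrec
            omega
        have hstep := ih (start + 1) e _ ans' (by omega) (by omega) he hinv' hInv'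
        rw [hA0, hstep]
        congr 2
        -- the two pending updates coincide
        rw [hans']
        exact congrArg (fun b => (lastD p, b))
          (updB_absorb K (lastD p) (e : Int) (start : Int) ans hszK hstm)
    · -- start = e + 1 = gems.length: A's guard fails; B's pending update is a no-op
      have hs1 : start = e + 1 := by omega
      have hA0 : loopA gems gems.length K dic ans start e = ans := by
        rw [loopA, dif_neg (by omega)]
      have hdrop : (PySem.List.enumerate gems).drop (e + 1) = [] := by
        apply List.drop_eq_nil_of_le
        rw [PySem.List.length_enumerate]
        omega
      have hupd : updB K (lastD p) (e : Int) (ans.1 + 1, ans.2 + 1) = (ans.1 + 1, ans.2 + 1) := by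
        unfold updB
        by_cases hsz : (lastD p).size = K
        · rw [if_pos hsz]
          have hInv2 : ans.2 - ans.1 + 1 ≤ (e : Int) - (start : Int) + 2 := by
            rcases hInv with h | h
            · omega
            · exact h
          have hpr1 : (((ans.1 + 1 : Int), (ans.2 + 1 : Int)) : Int × Int).2
              - ((ans.1 + 1 : Int), (ans.2 + 1 : Int)).1 = ans.2 - ans.1 := by
            show ans.2 + 1 - (ans.1 + 1) = ans.2 - ans.1
            ring
          rw [← hm0] at hm0lt
          rw [hplen] at hm0lt
          push_cast at hm0lt
          rw [if_neg (by rw [hpr1]; omega)]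
        · rw [if_neg hsz]
      rw [hA0, hdrop, hupd]
      rfl

-- ===== VERDICT (by name: the statement is the Claim_ definition above) =====
theorem solution_spec : Claim_equal_solution := by
  intro gems _ hpre
  unfold Spec_solution
  match gems, hpre with
  | g0 :: rest, _ =>
    have hne : (g0 :: rest) ≠ [] := List.cons_ne_nil g0 rest
    have hlen : 0 < (g0 :: rest).length := by simp
    have hinv0 : CntInv (pvWindow (g0 :: rest) 0 0)
        ((PySem.Dict.empty : PySem.Dict String Int).insert g0 1) := by
      have hw : pvWindow (g0 :: rest) 0 0 = [g0] := by simp [pvWindow]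
      rw [hw]
      exact cntinv_init g0
    have hb := bisim (g0 :: rest) hne (2 * (g0 :: rest).length) 0 0
      ((PySem.Dict.empty : PySem.Dict String Int).insert g0 1)
      (0, ((g0 :: rest).length : Int) - 1) (by omega) (by omega) hlen hinv0 (Or.inl rfl)
    have hA : solution (g0 :: rest)
        = [(loopA (g0 :: rest) (g0 :: rest).length (PySem.Set.ofList (g0 :: rest)).length
            ((PySem.Dict.empty : PySem.Dict String Int).insert g0 1)
            (0, ((g0 :: rest).length : Int) - 1) 0 0).1 + 1,
           (loopA (g0 :: rest) (g0 :: rest).length (PySem.Set.ofList (g0 :: rest)).length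
            ((PySem.Dict.empty : PySem.Dict String Int).insert g0 1)
            (0, ((g0 :: rest).length : Int) - 1) 0 0).2 + 1] := rfl
    have hB : solution_alt (g0 :: rest)
        = [((PySem.List.enumerate (g0 :: rest)).foldl
              (stepB (PySem.Set.ofList (g0 :: rest)).length)
              (PySem.Dict.empty, (1, ((g0 :: rest).length : Int)))).2.1,
           ((PySem.List.enumerate (g0 :: rest)).foldl
              (stepB (PySem.Set.ofList (g0 :: rest)).length)
              (PySem.Dict.empty, (1, ((g0 :: rest).length : Int)))).2.2] := rfl
    -- peel the first enumerated element off B's fold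
    have henum : PySem.List.enumerate (g0 :: rest)
        = (0, g0) :: PySem.List.enumerate rest 1 := by
      rw [PySem.List.enumerate_cons]
      norm_num
    have hdrop1 : (PySem.List.enumerate (g0 :: rest)).drop 1 = PySem.List.enumerate rest 1 := by
      rw [henum]
      rfl
    have hlast1 : lastD ((g0 :: rest).take 1)
        = (PySem.Dict.empty : PySem.Dict String Int).insert g0 0 := by
      rfl
    have hpair : (((0 : Int) + 1, (((g0 :: rest).length : Int) - 1) + 1) : Int × Int)
        = ((1 : Int), ((g0 :: rest).length : Int)) := by
      norm_num
    rw [hA, hB, henum, List.foldl_cons]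
    rw [hdrop1, hlast1] at hb
    have hstep1 : stepB (PySem.Set.ofList (g0 :: rest)).length
        (PySem.Dict.empty, (1, ((g0 :: rest).length : Int))) (0, g0)
        = ((PySem.Dict.empty : PySem.Dict String Int).insert g0 0,
           updB (PySem.Set.ofList (g0 :: rest)).length
             ((PySem.Dict.empty : PySem.Dict String Int).insert g0 0) ((0 : Nat) : Int)
             (((0 : Int) + 1, (((g0 :: rest).length : Int) - 1) + 1))) := by
      rw [hpair]
      rfl
    rw [hstep1]
    exact congrArg (fun p : Int × Int => [p.1, p.2]) hb
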